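-- pv_equiv track=rewrite | github.com/shunshun0904/stock_analysis | step1_stock_scanner.py | latest_fy_statement
-- ===== SOURCE A (Python) =====
-- def latest_fy_statement(rows: list) -> dict:
--     # 期末(FY)のみ、期末日→開示日の順で最新を選択
--     fy = [r for r in rows if r.get('TypeOfCurrentPeriod') == 'FY']
--     if not fy:
--         return {}
--     def keyfunc(r):
--         end = r.get('CurrentPeriodEndDate') or ''
--         dis = r.get('DisclosedDate') or ''
--         return (end, dis)
--     fy.sort(key=keyfunc)
--     return fy[-1]
-- ===== SOURCE B (Python) =====
-- def _key(r):
--     return ((r.get('CurrentPeriodEndDate') or '') , (r.get('DisclosedDate') or ''))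
--
--
-- def latest_fy_statement(rows: list) -> dict:
--     # single linear pass: keep the last row whose key is >= the best so far
--     best = None
--     for r in rows:
--         if r.get('TypeOfCurrentPeriod') == 'FY':
--             if best is None or _key(r) >= _key(best):
--                 best = r
--     return best if best is not None else {}
-- ===== Notes on version B (the rewrite author's own statement) =====
-- stated objective: simpler
-- what changed: Replaces A's filter-then-stable-sort-then-take-last with a single linear pass that keeps the best FY row so far, using a >= tie-break so the last row among equal keys wins exactly as with A's stable sort.
import Mathlib
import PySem

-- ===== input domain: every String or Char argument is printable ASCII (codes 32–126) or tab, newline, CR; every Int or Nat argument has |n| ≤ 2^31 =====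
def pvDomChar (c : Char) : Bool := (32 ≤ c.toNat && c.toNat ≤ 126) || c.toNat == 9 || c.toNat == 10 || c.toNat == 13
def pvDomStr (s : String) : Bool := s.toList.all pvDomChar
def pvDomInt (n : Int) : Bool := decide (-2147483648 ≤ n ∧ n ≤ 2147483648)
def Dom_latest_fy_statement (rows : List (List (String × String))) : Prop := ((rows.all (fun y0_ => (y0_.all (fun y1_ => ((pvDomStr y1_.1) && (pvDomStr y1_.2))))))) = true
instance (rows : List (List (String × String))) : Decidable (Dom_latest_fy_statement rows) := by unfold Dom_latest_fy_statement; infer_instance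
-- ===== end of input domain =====

-- B replaces A's filter-then-stable-sort with one linear pass keeping the best row so far
-- (tie-break ≥ so the last row among equal keys wins, as with A's stable sort); objective: simpler.

-- ===== PORT A =====
-- r.get('TypeOfCurrentPeriod') == 'FY'
def pvIsFY (r : List (String × String)) : Bool :=
  (PySem.Dict.mk r).get? "TypeOfCurrentPeriod" == some "FY"

-- `r.get(k) or ''`  (None → '', '' → '')
def pvOrEmpty (o : Option String) : String :=
  match o with
  | none => ""
  | some s => if s = "" then "" else s

-- keyfunc's first component: r.get('CurrentPeriodEndDate') or ''
def pvEndA (r : List (String × String)) : String :=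
  pvOrEmpty ((PySem.Dict.mk r).get? "CurrentPeriodEndDate")

-- keyfunc's second component: r.get('DisclosedDate') or ''
def pvDisA (r : List (String × String)) : String :=
  pvOrEmpty ((PySem.Dict.mk r).get? "DisclosedDate")

def latest_fy_statement (rows : List (List (String × String))) : List (String × String) :=
  let fy := rows.filter pvIsFY
  if fy = [] then []
  else PySem.List.pyGetD (PySem.List.sorted2 fy pvEndA pvDisA) (-1) []

-- ===== PORT B =====
-- Source B's _key(r)
def pvKeyB (r : List (String × String)) : String × String :=
  (pvOrEmpty ((PySem.Dict.mk r).get? "CurrentPeriodEndDate"),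
   pvOrEmpty ((PySem.Dict.mk r).get? "DisclosedDate"))

-- Python tuple comparison `a >= b` on a pair of strings, lexicographic
def pvGe (a b : String × String) : Bool :=
  decide (b.1 < a.1) || (a.1 == b.1 && decide (b.2 ≤ a.2))

def latest_fy_statement_alt (rows : List (List (String × String))) : List (String × String) :=
  match rows.foldl (fun best r =>
      if pvIsFY r then
        match best with
        | none => some r
        | some b => if pvGe (pvKeyB r) (pvKeyB b) then some r else some b
      else best) none with
  | some r => r
  | none => []

-- ===== PRECONDITION & SPEC =====
def Spec_latest_fy_statement (rows : List (List (String × String))) (out : List (String × String)) : Prop := out = latest_fy_statement_alt rows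
instance (rows : List (List (String × String))) (out : List (String × String)) : Decidable (Spec_latest_fy_statement rows out) := by unfold Spec_latest_fy_statement; infer_instance

-- ===== CLAIM (what is proved, stated in full; the proofs are below) =====
def Claim_equal_latest_fy_statement : Prop := ∀ (rows : List (List (String × String))), Dom_latest_fy_statement rows → Spec_latest_fy_statement rows (latest_fy_statement rows)

-- ===== LEMMAS AND PROOFS =====

-- the sort key of a row, as a lexicographically ordered pair
def pvL (r : List (String × String)) : Lex (String × String) := toLex (pvEndA r, pvDisA r)

-- sorted2's internal comparison, named
def pvBef (a b : List (String × String)) : Bool :=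
  decide (pvEndA a < pvEndA b) || (!decide (pvEndA b < pvEndA a) && decide (pvDisA a < pvDisA b))

theorem pvLt_pair_eq (a b : String × String) :
    (decide (a.1 < b.1) || (!decide (b.1 < a.1) && decide (a.2 < b.2)))
      = decide (toLex a < toLex b) := by
  rcases lt_trichotomy a.1 b.1 with h | h | h
  · simp [Prod.Lex.lt_iff, h, lt_asymm h]
  · by_cases hd : a.2 < b.2 <;> simp [Prod.Lex.lt_iff, h, hd]
  · simp [Prod.Lex.lt_iff, h, lt_asymm h, h.ne']

theorem pvBef_eq (a b : List (String × String)) : pvBef a b = decide (pvL a < pvL b) :=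
  pvLt_pair_eq (pvEndA a, pvDisA a) (pvEndA b, pvDisA b)

theorem sorted2_eq_foldl (fy : List (List (String × String))) :
    PySem.List.sorted2 fy pvEndA pvDisA
      = fy.foldl (fun acc x => PySem.List.insertBy pvBef x acc) [] := rfl

-- canonical one-pass step
def pvStepC (o : Option (List (String × String))) (r : List (String × String)) :
    Option (List (String × String)) :=
  some (match o with
        | none => r
        | some b => if pvL r < pvL b then b else r)

theorem insertBy_ne_nil (p : List (String × String) → List (String × String) → Bool)
    (x : List (String × String)) (s : List (List (String × String)))
    : PySem.List.insertBy p x s ≠ [] := by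
  cases s with
  | nil => simp [PySem.List.insertBy]
  | cons y ys => simp only [PySem.List.insertBy]; split <;> simp

theorem insertBy_pairwise (x : List (String × String)) (s : List (List (String × String)))
    (h : s.Pairwise (fun a b => pvL a ≤ pvL b)) :
    (PySem.List.insertBy pvBef x s).Pairwise (fun a b => pvL a ≤ pvL b) := by
  induction s with
  | nil => simp [PySem.List.insertBy]
  | cons y ys ih =>
    rcases List.pairwise_cons.mp h with ⟨hy, hys⟩
    simp only [PySem.List.insertBy, pvBef_eq]
    by_cases hxy : pvL x < pvL y
    · simp only [hxy, decide_true, if_true]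
      refine List.pairwise_cons.mpr ⟨?_, h⟩
      intro z hz
      rcases List.mem_cons.mp hz with rfl | hz
      · exact le_of_lt hxy
      · exact le_of_lt (lt_of_lt_of_le hxy (hy z hz))
    · simp only [hxy, decide_false]
      refine List.pairwise_cons.mpr ⟨?_, ih hys⟩
      intro z hz
      rcases (PySem.List.mem_insertBy pvBef x z ys).mp hz with rfl | hz
      · exact le_of_not_gt hxy
      · exact hy z hz

theorem insertBy_getLast? (x : List (String × String)) (s : List (List (String × String)))
    (h : s.Pairwise (fun a b => pvL a ≤ pvL b)) :
    (PySem.List.insertBy pvBef x s).getLast?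
      = some (match s.getLast? with
              | none => x
              | some b => if pvL x < pvL b then b else x) := by
  induction s with
  | nil => simp [PySem.List.insertBy]
  | cons y ys ih =>
    rcases List.pairwise_cons.mp h with ⟨hy, hys⟩
    simp only [PySem.List.insertBy, pvBef_eq]
    by_cases hxy : pvL x < pvL y
    · simp only [hxy, decide_true, if_true]
      cases hys' : (y :: ys).getLast? with
      | none => simp at hys'
      | some b =>
        have hb : b ∈ y :: ys := List.mem_of_getLast? hys'
        have hxb : pvL x < pvL b := by
          rcases List.mem_cons.mp hb with rfl | hb
          · exact hxy
          · exact lt_of_lt_of_le hxy (hy b hb)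
        rw [List.getLast?_cons_cons, hys']
        simp [hxb]
    · simp only [hxy, decide_false, Bool.false_eq_true, if_false]
      cases ys with
      | nil => simp [PySem.List.insertBy, hxy]
      | cons z zs =>
        have hne : PySem.List.insertBy pvBef x (z :: zs) ≠ [] := insertBy_ne_nil _ _ _
        obtain ⟨c, cs, hcc⟩ := List.exists_cons_of_ne_nil hne
        rw [hcc, List.getLast?_cons_cons, ← hcc, ih hys]
        rw [List.getLast?_cons_cons]

theorem foldl_insertBy_getLast? (l : List (List (String × String))) :
    ∀ (s : List (List (String × String))), s.Pairwise (fun a b => pvL a ≤ pvL b) →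
      (l.foldl (fun acc x => PySem.List.insertBy pvBef x acc) s).getLast?
        = l.foldl pvStepC s.getLast? := by
  induction l with
  | nil => intro s _; rfl
  | cons x t ih =>
    intro s hs
    simp only [List.foldl_cons]
    rw [ih _ (insertBy_pairwise x s hs), insertBy_getLast? x s hs]
    rfl

theorem pvGe_eq (a b : String × String) : pvGe a b = !decide (toLex a < toLex b) := by
  rcases lt_trichotomy a.1 b.1 with h | h | h
  · simp [pvGe, Prod.Lex.lt_iff, h, lt_asymm h, h.ne]
  · by_cases hd : a.2 < b.2
    · simp [pvGe, Prod.Lex.lt_iff, h, hd, not_le.mpr hd]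
    · simp [pvGe, Prod.Lex.lt_iff, h, hd, not_lt.mp hd]
  · simp [pvGe, Prod.Lex.lt_iff, h, lt_asymm h, h.ne']

theorem stepB_eq_stepC :
    (fun (best : Option (List (String × String))) (b : List (String × String)) =>
        match best with
        | none => some b
        | some c => if pvGe (pvKeyB b) (pvKeyB c) then some b else some c) = pvStepC := by
  funext o r
  cases o with
  | none => rfl
  | some b =>
    have hge : pvGe (pvKeyB r) (pvKeyB b) = !decide (pvL r < pvL b) :=
      pvGe_eq (pvKeyB r) (pvKeyB b)
    simp only [pvStepC, hge]
    by_cases hlt : pvL r < pvL b <;> simp [hlt]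

theorem foldl_stepC_isSome (t : List (List (String × String)))
    : ∀ (o : Option (List (String × String))), o.isSome →
      (t.foldl pvStepC o).isSome := by
  induction t with
  | nil => intro o h; exact h
  | cons x s ih => intro o _; exact ih _ rfl

-- ===== VERDICT (by name: the statement is the Claim_ definition above) =====
theorem latest_fy_statement_spec : Claim_equal_latest_fy_statement := by
  intro rows _
  unfold Spec_latest_fy_statement latest_fy_statement latest_fy_statement_alt
  rw [← List.foldl_filter]
  rw [stepB_eq_stepC]
  cases hfy : rows.filter pvIsFY with
  | nil => simp
  | cons x t =>
    show (if (x :: t : List (List (String × String))) = [] then []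
          else PySem.List.pyGetD (PySem.List.sorted2 (x :: t) pvEndA pvDisA) (-1) []) = _
    rw [if_neg (List.cons_ne_nil x t)]
    have hkey := foldl_insertBy_getLast? (x :: t) [] (by simp)
    rw [← sorted2_eq_foldl] at hkey
    simp only [List.getLast?_nil] at hkey
    have hsome : ((x :: t).foldl pvStepC none).isSome := by
      simp only [List.foldl_cons]
      exact foldl_stepC_isSome t _ rfl
    cases hres : (x :: t).foldl pvStepC none with
    | none => rw [hres] at hsome; simp at hsome
    | some r =>
      rw [hres] at hkey
      have hne : PySem.List.sorted2 (x :: t) pvEndA pvDisA ≠ [] := by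
        intro h; rw [h] at hkey; simp at hkey
      rw [PySem.List.pyGetD_neg_one (PySem.List.sorted2 (x :: t) pvEndA pvDisA) [] hne]
      rw [List.getLast?_eq_some_getLast hne] at hkey
      simp only [Option.some.injEq] at hkey
      simp [hkey]
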